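-- pv_equiv track=rewrite | github.com/Rahulnisanth/Complete-Python-Hub | CompetitiveCodings/HackSussex.py | alterArray
-- ===== SOURCE A (Python) =====
-- def alterArray(array):
--     def helper(nums, steps):
--         nums = [num for num in nums if num > 0]
--         if not nums:
--             return steps
--         k = min(nums)
--         nums = [num - k for num in nums]
--         return helper(nums, steps + 1)
--     steps = helper(array, 0)
--     return steps
-- ===== SOURCE B (Python) =====
-- def alterArray(array):
--     positives = sorted(x for x in array if x > 0)
--     prev = None
--     count = 0
--     for x in positives:
--         if x != prev:
--             count += 1
--         prev = x
--     return count
-- ===== Notes on version B (the rewrite author's own statement) =====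
-- stated objective: faster
-- what changed: Replaced A's repeated min-peeling recursion (re-scanning and rebuilding the list once per distinct positive value) with a single sort of the positive values followed by one adjacent-difference scan counting distinct values.
import Mathlib
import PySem

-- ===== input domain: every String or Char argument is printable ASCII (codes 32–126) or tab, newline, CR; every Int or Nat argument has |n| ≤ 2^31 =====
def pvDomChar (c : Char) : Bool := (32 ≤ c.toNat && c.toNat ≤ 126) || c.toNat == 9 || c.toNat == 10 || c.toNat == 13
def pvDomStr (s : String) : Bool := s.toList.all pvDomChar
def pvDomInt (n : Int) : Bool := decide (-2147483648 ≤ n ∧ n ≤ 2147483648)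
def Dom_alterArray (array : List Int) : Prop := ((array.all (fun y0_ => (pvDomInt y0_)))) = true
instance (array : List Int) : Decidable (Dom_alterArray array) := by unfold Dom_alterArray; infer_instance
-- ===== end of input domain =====

-- B replaces A's repeated min-peeling recursion by a single sort of the positive
-- values plus one adjacent-difference scan (objective: faster, O(n log n) vs O(n·d)).


-- ===== PORT A =====
-- inner 'helper(nums, steps)': filter positives, stop if empty, else subtract the
-- minimum from every element and recurse with steps+1.  The fuel argument is only a
-- totality guard (each call strictly shrinks the filtered list, so length+1 suffices
-- and the fuel-0 branch is never reached; proved in pv_helper_aux below).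
def alterHelper (fuel : Nat) (nums : List Int) (steps : Int) : Int :=
  match fuel with
  | 0 => steps
  | fuel + 1 =>
    let nums1 := nums.filter (fun num => decide (0 < num))
    if nums1 = [] then steps
    else
      match PySem.List.min? nums1 (fun x => x) with
      | none => steps  -- unreachable: nums1 ≠ []
      | some k => alterHelper fuel (nums1.map (fun num => num - k)) (steps + 1)

def alterArray (array : List Int) : Int :=
  alterHelper (array.length + 1) array 0

-- ===== PORT B =====
-- loop body: 'if x != prev: count += 1' then 'prev = x' (prev starts as None)
def bStep (st : Option Int × Int) (x : Int) : Option Int × Int :=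
  if some x ≠ st.1 then (some x, st.2 + 1) else (some x, st.2)

def alterArray_alt (array : List Int) : Int :=
  let positives := PySem.List.sorted (array.filter (fun x => decide (0 < x))) (fun x => x) false
  (positives.foldl bStep (none, 0)).2

-- ===== PRECONDITION & SPEC =====
def Spec_alterArray (array : List Int) (out : Int) : Prop := out = alterArray_alt array
instance (array : List Int) (out : Int) : Decidable (Spec_alterArray array out) := by unfold Spec_alterArray; infer_instance

-- ===== CLAIM (what is proved, stated in full; the proofs are below) =====
def Claim_equal_alterArray : Prop := ∀ (array : List Int), Dom_alterArray array → Spec_alterArray array (alterArray array)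

-- ===== LEMMAS AND PROOFS =====

-- card bookkeeping: |insert x s| = |s \ {x}| + 1
theorem pv_card_insert (s : Finset Int) (x : Int) :
    (insert x s).card = (s.erase x).card + 1 := by
  by_cases h : x ∈ s
  · rw [Finset.insert_eq_self.mpr h, Finset.card_erase_of_mem h]
    have := Finset.card_pos.mpr ⟨x, h⟩; omega
  · rw [Finset.card_insert_of_notMem h, Finset.erase_eq_of_notMem h]

-- B's scan with a seen sentinel counts the distinct remaining values
theorem pv_scan_some (l : List Int) (hs : l.Pairwise (· ≤ ·)) :
    ∀ (p c : Int), (∀ x ∈ l, p ≤ x) →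
      (l.foldl bStep (some p, c)).2 = c + ((l.toFinset.erase p).card : Int) := by
  induction l with
  | nil => intro p c _; simp
  | cons x xs ih =>
    intro p c hp
    have hx : ∀ y ∈ xs, x ≤ y := fun y hy => (List.pairwise_cons.mp hs).1 y hy
    have hs' : xs.Pairwise (· ≤ ·) := (List.pairwise_cons.mp hs).2
    by_cases hxp : x = p
    · have : bStep (some p, c) x = (some p, c) := by subst hxp; simp [bStep]
      rw [List.foldl_cons, this, ih hs' p c (fun y hy => hxp ▸ hx y hy)]
      subst hxp
      simp [List.toFinset_cons, Finset.erase_insert_eq_erase]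
    · have hb : bStep (some p, c) x = (some x, c + 1) := by
        simp [bStep]; omega
      rw [List.foldl_cons, hb, ih hs' x (c + 1) hx]
      have hpnot : p ∉ (x :: xs).toFinset := by
        simp only [List.toFinset_cons, Finset.mem_insert, List.mem_toFinset]
        rintro (h | h)
        · exact hxp h.symm
        · have := hx p h; have := hp x (List.mem_cons_self ..); omega
      rw [Finset.erase_eq_of_notMem hpnot]
      have : ((x :: xs).toFinset).card = (xs.toFinset.erase x).card + 1 := by
        simp only [List.toFinset_cons]; exact pv_card_insert _ _
      rw [this]; push_cast; ring

theorem pv_scan_none (l : List Int) (hs : l.Pairwise (· ≤ ·)) (c : Int) :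
    (l.foldl bStep (none, c)).2 = c + (l.toFinset.card : Int) := by
  cases l with
  | nil => simp
  | cons x xs =>
    have hx : ∀ y ∈ xs, x ≤ y := fun y hy => (List.pairwise_cons.mp hs).1 y hy
    have hs' : xs.Pairwise (· ≤ ·) := (List.pairwise_cons.mp hs).2
    have hb : bStep (none, c) x = (some x, c + 1) := by simp [bStep]
    rw [List.foldl_cons, hb, pv_scan_some xs hs' x (c + 1) hx]
    have : ((x :: xs).toFinset).card = (xs.toFinset.erase x).card + 1 := by
      simp only [List.toFinset_cons]; exact pv_card_insert _ _
    rw [this]; push_cast; ring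

-- subtracting the minimum and dropping the zeros removes exactly one distinct value
theorem pv_card_shift (l : List Int) (k : Int) (hk : k ∈ l) (hmin : ∀ x ∈ l, k ≤ x) :
    (((l.map (fun n => n - k)).filter (fun n => decide (0 < n))).toFinset.card) + 1
      = l.toFinset.card := by
  have h1 : (l.map (fun n => n - k)).filter (fun n => decide (0 < n))
      = (l.filter (fun n => decide (k < n))).map (fun n => n - k) := by
    simp [List.filter_map, Function.comp_def, Int.sub_pos]
  have h2 : ((l.filter (fun n => decide (k < n))).map (fun n => n - k)).toFinset
      = (l.filter (fun n => decide (k < n))).toFinset.image (fun n => n - k) := by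
    ext x; simp [List.mem_toFinset, Finset.mem_image]
  have hinj : Function.Injective (fun n : Int => n - k) := fun a b h => by
    simpa using congrArg (· + k) h
  have h3 : (l.filter (fun n => decide (k < n))).toFinset = l.toFinset.erase k := by
    ext x
    simp only [List.mem_toFinset, List.mem_filter, Finset.mem_erase, decide_eq_true_eq]
    constructor
    · rintro ⟨hxl, hx⟩; exact ⟨by omega, hxl⟩
    · rintro ⟨hne, hxl⟩; exact ⟨hxl, by have := hmin x hxl; omega⟩
  rw [h1, h2, Finset.card_image_of_injective _ hinj, h3]
  exact Finset.card_erase_add_one (List.mem_toFinset.mpr hk)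

-- A's helper counts the distinct positive values (induction on fuel; the
-- filtered length strictly drops each step, so any fuel above it is enough)
theorem pv_helper_aux (fuel : Nat) : ∀ (nums : List Int) (steps : Int),
    (nums.filter (fun m => decide (0 < m))).length < fuel →
    alterHelper fuel nums steps
      = steps + (((nums.filter (fun m => decide (0 < m))).toFinset.card : Int)) := by
  induction fuel with
  | zero => intro nums steps h; omega
  | succ fuel ih =>
    intro nums steps hlt
    rw [alterHelper]
    by_cases hnil : nums.filter (fun num => decide (0 < num)) = []
    · simp [hnil]
    · simp only [hnil, ite_false]
      split
      case _ h => exact absurd ((PySem.List.min?_eq_none_iff _ _).mp h) hnil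
      case _ k h =>
        have hk : k ∈ nums.filter (fun num => decide (0 < num)) := PySem.List.min?_mem h
        have hmin : ∀ x ∈ nums.filter (fun num => decide (0 < num)), k ≤ x := by
          intro x hx; simpa using PySem.List.min?_isMin h x hx
        have hcard := pv_card_shift (nums.filter (fun num => decide (0 < num))) k hk hmin
        have hdec : (((nums.filter (fun num => decide (0 < num))).map (fun num => num - k)).filter
            (fun m => decide (0 < m))).length < (nums.filter (fun m => decide (0 < m))).length := by
          have heq : ((nums.filter (fun num => decide (0 < num))).map (fun num => num - k)).filter
              (fun m => decide (0 < m))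
              = ((nums.filter (fun num => decide (0 < num))).filter (fun num => decide (k < num))).map
                  (fun num => num - k) := by
            simp [List.filter_map, Function.comp_def, Int.sub_pos]
          rw [heq, List.length_map]
          exact List.length_filter_lt_length_iff_exists.mpr ⟨k, hk, by simp⟩
        rw [ih _ (steps + 1) (by omega)]
        push_cast [← hcard]; ring

-- ===== VERDICT (by name: the statement is the Claim_ definition above) =====
theorem alterArray_spec : Claim_equal_alterArray := by
  intro array _
  unfold Spec_alterArray alterArray alterArray_alt
  have hperm := PySem.List.sorted_perm (array.filter (fun x => decide (0 < x))) (fun x => x) false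
  have hpair : (PySem.List.sorted (array.filter (fun x => decide (0 < x))) (fun x => x) false).Pairwise (· ≤ ·) :=
    PySem.List.sorted_pairwise _ (fun x => x)
  rw [pv_helper_aux _ _ _ (by have := List.length_filter_le (fun m => decide (0 < m)) array; omega),
      pv_scan_none _ hpair 0, List.toFinset_eq_of_perm _ _ hperm]
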